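-- pv_equiv track=rewrite | github.com/AntonJMLarsson/stitcher.py | stitcher.py | get_insertions_locs
-- ===== SOURCE A (Python) =====
-- def get_insertions_locs(cigtuples):
--     insertion_locs = []
--     l = 0
--     for c in cigtuples:
--         if c[0] == 0:
--             l += c[1]
--         elif c[0] == 1:
--             for i in range(c[1]):
--                 insertion_locs.append(l)
--                 l += 1
--     return insertion_locs
-- ===== SOURCE B (Python) =====
-- def get_insertions_locs(cigtuples):
--     # Prefix table of genomic start positions, then emit insertion ranges.
--     starts = [0]
--     for op, length in cigtuples:
--         starts.append(starts[-1] + (length if op in (0, 1) else 0))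
--     return [p for (op, length), s in zip(cigtuples, starts) if op == 1
--             for p in range(s, s + length)]
-- ===== Notes on version B (the rewrite author's own statement) =====
-- stated objective: alternative
-- what changed: Replaces A's single loop mutating a running position while appending, with a two-pass scheme: first a prefix table of per-op genomic start positions, then a comprehension over zip(cigtuples, starts) emitting range(start, start+len) for each insertion op; Pre_ excludes insertion ops with negative length, a malformed CIGAR on which A's not-advancing behaviour is an accident of its empty inner range loop.
-- outside the precondition, e.g. on get_insertions_locs([(1, -2), (1, 1)]): A returns [0], B returns [-2]
import Mathlib
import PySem

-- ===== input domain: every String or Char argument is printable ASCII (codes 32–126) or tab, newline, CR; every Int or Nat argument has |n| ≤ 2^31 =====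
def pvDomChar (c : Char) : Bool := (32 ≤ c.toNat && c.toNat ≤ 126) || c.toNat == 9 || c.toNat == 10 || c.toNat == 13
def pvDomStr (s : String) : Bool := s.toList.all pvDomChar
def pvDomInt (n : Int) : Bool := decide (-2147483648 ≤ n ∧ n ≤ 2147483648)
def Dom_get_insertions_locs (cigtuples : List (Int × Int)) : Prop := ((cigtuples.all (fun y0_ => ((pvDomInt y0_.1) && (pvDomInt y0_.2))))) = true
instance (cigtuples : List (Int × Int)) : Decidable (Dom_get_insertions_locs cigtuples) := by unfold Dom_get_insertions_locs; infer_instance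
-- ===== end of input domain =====

-- B replaces A's single mutating loop by a prefix table of start positions plus a second emitting pass (alternative decomposition, same cost).

-- ===== PORT A =====
def get_insertions_locs (cigtuples : List (Int × Int)) : List Int :=
  -- the growing list is kept reversed (cons instead of append) and reversed once at the end,
  -- the standard faithful rendering of Python's O(1) list.append
  (cigtuples.foldl (fun (st : List Int × Int) c =>
      if c.1 = 0 then (st.1, st.2 + c.2)
      else if c.1 = 1 then
        -- for i in range(c[1]): insertion_locs.append(l); l += 1
        (List.range c.2.toNat).foldl (fun st2 _ => (st2.2 :: st2.1, st2.2 + 1)) st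
      else st)
    ([], 0)).1.reverse

-- ===== PORT B =====
def get_insertions_locs_alt (cigtuples : List (Int × Int)) : List Int :=
  let starts := cigtuples.foldl (fun acc c =>
      acc ++ [acc.getLast! + (if c.1 = 0 ∨ c.1 = 1 then c.2 else 0)]) [0]
  (cigtuples.zip starts).flatMap (fun p =>
      if p.1.1 = 1 then PySem.List.pyRange p.2 (p.2 + p.1.2) 1 else [])

-- ===== PRECONDITION & SPEC =====
-- Pre_ excludes insertion ops with negative length (malformed CIGAR): there A still returns,
-- but its not-advancing-the-position behaviour is an accident of its empty inner range loop,
-- and B's advancing-by-the-stated-length is equally defensible.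
def Pre_get_insertions_locs (cigtuples : List (Int × Int)) : Prop :=
  ∀ c ∈ cigtuples, c.1 = 1 → 0 ≤ c.2
instance (cigtuples : List (Int × Int)) : Decidable (Pre_get_insertions_locs cigtuples) := by unfold Pre_get_insertions_locs; infer_instance
def pvWitness_get_insertions_locs : (List (Int × Int)) := [(0, 5), (1, 2), (2, 3), (1, 1)]

def Spec_get_insertions_locs (cigtuples : List (Int × Int)) (out : List Int) : Prop := out = get_insertions_locs_alt cigtuples
instance (cigtuples : List (Int × Int)) (out : List Int) : Decidable (Spec_get_insertions_locs cigtuples out) := by unfold Spec_get_insertions_locs; infer_instance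

-- ===== CLAIM (what is proved, stated in full; the proofs are below) =====
def Claim_equal_get_insertions_locs : Prop := ∀ (cigtuples : List (Int × Int)), Dom_get_insertions_locs cigtuples → Pre_get_insertions_locs cigtuples → Spec_get_insertions_locs cigtuples (get_insertions_locs cigtuples)

-- ===== LEMMAS AND PROOFS =====

-- per-op advance of the genomic position in B (proof-only helper)
def pvContrib (c : Int × Int) : Int :=
  if c.1 = 0 ∨ c.1 = 1 then c.2 else 0

-- reference function for A: insertion locations starting from position l
def pvGo : List (Int × Int) → Int → List Int
  | [], _ => []
  | c :: cs, l =>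
    if c.1 = 0 then pvGo cs (l + c.2)
    else if c.1 = 1 then PySem.List.pyRange l (l + c.2) 1 ++ pvGo cs (l + max c.2 0)
    else pvGo cs l

-- reference function for B: same but advancing by the stated length on insertions
def pvGoB : List (Int × Int) → Int → List Int
  | [], _ => []
  | c :: cs, l =>
    if c.1 = 0 then pvGoB cs (l + c.2)
    else if c.1 = 1 then PySem.List.pyRange l (l + c.2) 1 ++ pvGoB cs (l + c.2)
    else pvGoB cs l

-- tail of B's starts table from position l
def pvScan : List (Int × Int) → Int → List Int
  | [], _ => []
  | c :: cs, l => (l + pvContrib c) :: pvScan cs (l + pvContrib c)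

lemma pv_inner (n : Nat) (acc : List Int) (l : Int) :
    (List.range n).foldl (fun st2 _ => (st2.2 :: st2.1, st2.2 + 1)) (acc, l)
      = (((List.range n).map (fun i => l + (i : Int))).reverse ++ acc, l + n) := by
  induction n generalizing acc l with
  | zero => simp
  | succ n ih =>
    rw [List.range_succ, List.foldl_append, ih]
    simp
    omega

lemma pv_mapcast (l : Int) (ns : List Nat) :
    List.map (fun i => l + i) (List.flatMap (fun a => [((a : Nat) : Int)]) ns)
      = List.map (fun k : Nat => l + (k : Int)) ns := by
  induction ns with
  | nil => rfl
  | cons x xs ih => simp only [List.flatMap_cons, List.map_append, List.map_cons, List.map_nil, ih]; rfl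

lemma pv_range_eq (l : Int) (n : Int) :
    PySem.List.pyRange l (l + n) 1 = (List.range n.toNat).map (fun i => l + (i : Int)) := by
  rw [PySem.List.pyRange_one]
  have h2 : l + n - l = n := by ring
  rw [h2]
  rw [show (do let a ← List.range n.toNat; pure ((a : Int))) = List.flatMap (fun a => [((a : Nat) : Int)]) (List.range n.toNat) from rfl]
  exact (pv_mapcast l (List.range n.toNat)).symm

lemma pv_foldA (xs : List (Int × Int)) (acc : List Int) (l : Int) :
    (xs.foldl (fun (st : List Int × Int) c =>
        if c.1 = 0 then (st.1, st.2 + c.2)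
        else if c.1 = 1 then
          (List.range c.2.toNat).foldl (fun st2 _ => (st2.2 :: st2.1, st2.2 + 1)) st
        else st) (acc, l)).1 = (pvGo xs l).reverse ++ acc := by
  induction xs generalizing acc l with
  | nil => simp [pvGo]
  | cons c cs ih =>
    by_cases h0 : c.1 = 0
    · simp [List.foldl_cons, h0, pvGo, ih]
    · by_cases h1 : c.1 = 1
      · rw [List.foldl_cons, if_neg h0, if_pos h1, pv_inner, ih]
        simp only [pvGo, if_neg h0, if_pos h1]
        have hmax : ((c.2.toNat : Int)) = max c.2 0 := Int.ofNat_toNat c.2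
        rw [pv_range_eq l c.2, List.reverse_append, List.append_assoc, hmax]
      · simp [List.foldl_cons, h0, h1, pvGo, ih]

lemma pv_go_eq (xs : List (Int × Int)) (l : Int)
    (h : ∀ c ∈ xs, c.1 = 1 → 0 ≤ c.2) : pvGo xs l = pvGoB xs l := by
  induction xs generalizing l with
  | nil => rfl
  | cons c cs ih =>
    have hcs : ∀ c ∈ cs, c.1 = 1 → 0 ≤ c.2 := fun d hd => h d (List.mem_cons_of_mem _ hd)
    by_cases h0 : c.1 = 0
    · simp [pvGo, pvGoB, h0, ih _ hcs]
    · by_cases h1 : c.1 = 1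
      · have : max c.2 0 = c.2 := max_eq_left (h c List.mem_cons_self h1)
        simp [pvGo, pvGoB, h1, this, ih _ hcs]
      · simp [pvGo, pvGoB, h0, h1, ih _ hcs]

lemma pv_starts (xs : List (Int × Int)) (pre : List Int) (l : Int) :
    xs.foldl (fun acc c =>
        acc ++ [acc.getLast! + (if c.1 = 0 ∨ c.1 = 1 then c.2 else 0)])
      (pre ++ [l]) = pre ++ [l] ++ pvScan xs l := by
  induction xs generalizing pre l with
  | nil => simp [pvScan]
  | cons c cs ih =>
    have hlast : (pre ++ [l]).getLast! = l := by
      rw [List.getLast!_eq_getLast?_getD]; simp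
    rw [List.foldl_cons, hlast]
    have := ih (pre ++ [l]) (l + pvContrib c)
    simp only [pvContrib] at this
    rw [List.append_assoc, List.append_assoc] at this ⊢
    simpa [pvScan, pvContrib] using this

lemma pv_zipB (xs : List (Int × Int)) (l : Int) :
    (xs.zip (l :: pvScan xs l)).flatMap (fun p =>
        if p.1.1 = 1 then PySem.List.pyRange p.2 (p.2 + p.1.2) 1 else [])
      = pvGoB xs l := by
  induction xs generalizing l with
  | nil => simp [pvGoB]
  | cons c cs ih =>
    simp only [pvScan, List.zip_cons_cons, List.flatMap_cons, ih]
    by_cases h0 : c.1 = 0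
    · simp [pvGoB, pvContrib, h0]
    · by_cases h1 : c.1 = 1
      · simp [pvGoB, pvContrib, h1]
      · simp [pvGoB, pvContrib, h0, h1]

-- ===== VERDICT (by name: the statement is the Claim_ definition above) =====
theorem get_insertions_locs_spec : Claim_equal_get_insertions_locs := by
  intro xs _ hpre
  show get_insertions_locs xs = get_insertions_locs_alt xs
  unfold get_insertions_locs get_insertions_locs_alt
  have hA := pv_foldA xs [] 0
  have hS := pv_starts xs [] 0
  simp only [List.nil_append] at hA hS
  rw [hA, hS, List.append_nil, List.reverse_reverse, pv_go_eq xs 0 hpre]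
  exact (pv_zipB xs 0).symm
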